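-- pv_equiv track=rewrite | github.com/torisutansan02/Grokking-Series | Data Manipulation/questions/q2_group_transactions.py | group_transactions
-- ===== SOURCE A (Python) =====
-- from typing import List
--
-- def group_transactions(transactions: List[str]) -> List[str]:
--     # Empty hash map for item count
--     count = {}
--
--     # Iterate through items in transactions
--     for item in transactions:
--         count[item] = 1 + count.get(item, 0)
--
--     sorted_count = sorted(count.items(), key = lambda x: (-x[1], x[0]))
--
--     # "item count"
--     return [
--         f"{item} {amount}"
--         for (item, amount) in sorted_count
--     ]
-- ===== SOURCE B (Python) =====
-- from typing import List
--
-- def group_transactions(transactions: List[str]) -> List[str]: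
--     # Sort first so equal items are adjacent, then one run-length scan.
--     ts = sorted(transactions)
--     pairs = []
--     if ts:
--         cur = ts[0]
--         cnt = 1
--         for item in ts[1:]:
--             if item == cur:
--                 cnt += 1
--             else:
--                 pairs.append((cur, cnt))
--                 cur, cnt = item, 1
--         pairs.append((cur, cnt))
--     pairs.sort(key=lambda p: (-p[1], p[0]))
--     return [f"{item} {amount}" for item, amount in pairs]
-- ===== Notes on version B (the rewrite author's own statement) =====
-- stated objective: alternative
-- what changed: Replaces the hash-map counting pass with sort-then-run-length-scan: sort the list, emit (item, run length) pairs in one linear scan over the sorted list, then order the pairs by (-count, name).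
import Mathlib
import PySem

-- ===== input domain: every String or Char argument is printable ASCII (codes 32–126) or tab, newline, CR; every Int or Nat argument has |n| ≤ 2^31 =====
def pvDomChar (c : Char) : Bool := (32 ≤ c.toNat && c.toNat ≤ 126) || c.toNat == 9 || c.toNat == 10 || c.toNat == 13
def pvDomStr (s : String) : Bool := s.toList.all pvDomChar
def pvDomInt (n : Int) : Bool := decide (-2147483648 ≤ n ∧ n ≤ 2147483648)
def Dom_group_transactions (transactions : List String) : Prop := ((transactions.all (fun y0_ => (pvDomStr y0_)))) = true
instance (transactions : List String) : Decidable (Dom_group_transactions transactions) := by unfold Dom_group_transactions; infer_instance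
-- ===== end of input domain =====

-- B counts by sorting the list and run-length-scanning adjacent equal items instead of A's hash-map counting pass; same output, proved equal.


-- ===== PORT A =====
def group_transactions (transactions : List String) : List String :=
  -- count = {}; for item in transactions: count[item] = 1 + count.get(item, 0)
  let count : PySem.Dict String Int :=
    transactions.foldl (fun d item => d.insert item (1 + d.getD item 0)) PySem.Dict.empty
  -- sorted(count.items(), key=lambda x: (-x[1], x[0]))
  let sorted_count := PySem.List.sorted2 count.items (fun x => -x.2) (fun x => x.1)
  sorted_count.map (fun p => p.1 ++ " " ++ PySem.Int.toStr p.2)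

-- ===== PORT B =====
-- loop body: if item == cur: cnt += 1 else: pairs.append((cur, cnt)); cur, cnt = item, 1
def gtStep (st : List (String × Int) × String × Int) (item : String) : List (String × Int) × String × Int :=
  if item == st.2.1 then (st.1, st.2.1, st.2.2 + 1) else (st.1 ++ [(st.2.1, st.2.2)], item, 1)

def gtPairs (ts : List String) : List (String × Int) :=
  match ts with
  | [] => []
  | x :: rest =>
    let st := rest.foldl gtStep ([], x, 1)
    st.1 ++ [(st.2.1, st.2.2)]

def group_transactions_alt (transactions : List String) : List String :=
  let ts := PySem.List.sorted transactions (fun x => x)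
  let pairs : List (String × Int) := gtPairs ts
  (PySem.List.sorted2 pairs (fun p => -p.2) (fun p => p.1)).map
    (fun p => p.1 ++ " " ++ PySem.Int.toStr p.2)

-- ===== PRECONDITION & SPEC =====
def Spec_group_transactions (transactions : List String) (out : List String) : Prop := out = group_transactions_alt transactions
instance (transactions : List String) (out : List String) : Decidable (Spec_group_transactions transactions out) := by unfold Spec_group_transactions; infer_instance

-- ===== CLAIM (what is proved, stated in full; the proofs are below) =====
def Claim_equal_group_transactions : Prop := ∀ (transactions : List String), Dom_group_transactions transactions → Spec_group_transactions transactions (group_transactions transactions)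

-- ===== LEMMAS AND PROOFS =====

-- the run-length scan of B, written as structural recursion (proof-side mirror of the foldl)
def runSpec (cur : String) (cnt : Int) : List String → List (String × Int)
  | [] => [(cur, cnt)]
  | y :: t => if y = cur then runSpec cur (cnt + 1) t else (cur, cnt) :: runSpec y 1 t

theorem foldl_gtStep (t : List String) : ∀ (ps : List (String × Int)) (cur : String) (cnt : Int),
    (let st := t.foldl gtStep (ps, cur, cnt); st.1 ++ [(st.2.1, st.2.2)]) = ps ++ runSpec cur cnt t := by
  induction t with
  | nil => intro ps cur cnt; simp [runSpec]
  | cons y t ih =>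
    intro ps cur cnt
    simp only [List.foldl_cons, gtStep, runSpec]
    by_cases h : y = cur
    · simp [h, ih]
    · simp [h, ih, List.append_assoc]

-- removing one element's occurrences commutes with first-occurrence dedup
theorem dedup_filter_ne (x : String) (t : List String) :
    (PySem.List.dedup t).filter (fun z => !(z == x))
      = PySem.List.dedup (t.filter (fun z => !(z == x))) := by
  induction t with
  | nil => rfl
  | cons y t ih =>
    by_cases h : y = x
    · subst h
      show ((PySem.Set.ofList (y :: t)).filter _) = _
      rw [PySem.Set.ofList_cons]
      show ((y :: (PySem.List.dedup t).filter (fun z => !(z == y))).filter (fun z => !(z == y))) = _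
      have h1 : ∀ (L : List String), List.filter (fun z => !(z == y)) (y :: L)
          = List.filter (fun z => !(z == y)) L := by
        intro L; simp
      simp only [h1, List.filter_filter, Bool.and_self]
      exact ih
    · show ((PySem.Set.ofList (y :: t)).filter _) = _
      rw [PySem.Set.ofList_cons]
      show ((y :: (PySem.List.dedup t).filter (fun z => !(z == y))).filter (fun z => !(z == x))) = _
      have hf : List.filter (fun z => !(z == x)) (y :: t) = y :: List.filter (fun z => !(z == x)) t := by
        simp [h]
      rw [hf]
      show _ = PySem.Set.ofList (y :: List.filter (fun z => !(z == x)) t)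
      rw [PySem.Set.ofList_cons]
      show _ = y :: (PySem.List.dedup (List.filter (fun z => !(z == x)) t)).filter (fun z => !(z == y))
      rw [← ih]
      simp [h, List.filter_filter, Bool.and_comm]

theorem runSpec_eq (t : List String) : ∀ (cur : String) (cnt : Int),
    (cur :: t).Pairwise (· ≤ ·) →
    runSpec cur cnt t
      = (cur, cnt + (List.count cur t : Int))
          :: (PySem.List.dedup (t.filter (fun z => !(z == cur)))).map
               (fun k => (k, (List.count k t : Int))) := by
  induction t with
  | nil => intro cur cnt _; simp [runSpec]
  | cons y t ih =>
    intro cur cnt hp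
    by_cases h : y = cur
    · subst h
      have hp' : (y :: t).Pairwise (· ≤ ·) := hp.tail
      have hfl : List.filter (fun z => !(z == y)) (y :: t) = List.filter (fun z => !(z == y)) t := by
        simp
      have hfe : ∀ k ∈ PySem.List.dedup (t.filter (fun z => !(z == y))),
          ((k, (List.count k t : Int)) : String × Int) = (k, (List.count k (y :: t) : Int)) := by
        intro k hk
        have hk' : k ∈ t.filter (fun z => !(z == y)) := (PySem.List.mem_dedup _ _).1 hk
        have hkne : k ≠ y := by simpa using List.of_mem_filter hk'
        simp [List.count_cons_of_ne (Ne.symm hkne)]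
      rw [runSpec, if_pos rfl, ih y (cnt + 1) hp', hfl, List.map_congr_left hfe]
      congr 1
      simp only [List.count_cons_self]
      push_cast
      ring
    · have hcy : cur ≤ y := (List.pairwise_cons.1 hp).1 y (by simp)
      have hlt : cur < y := lt_of_le_of_ne hcy (fun e => h e.symm)
      have hyt : ∀ z ∈ t, y ≤ z := (List.pairwise_cons.1 hp.tail).1
      have hcurt : cur ∉ t := by
        intro hm; exact absurd (hyt cur hm) (not_le.2 hlt)
      have hp' : (y :: t).Pairwise (· ≤ ·) := hp.tail
      have hcnt0 : List.count cur (y :: t) = 0 := by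
        apply List.count_eq_zero.2
        intro hm
        rcases List.mem_cons.1 hm with e | hm'
        · exact h e.symm
        · exact hcurt hm'
      have hfilt : List.filter (fun z => !(z == cur)) t = t := by
        apply List.filter_eq_self.2
        intro z hz
        have : z ≠ cur := by
          intro e; exact hcurt (e ▸ hz)
        simp [this]
      have hfe : ∀ k ∈ PySem.List.dedup (t.filter (fun z => !(z == y))),
          ((k, (List.count k t : Int)) : String × Int) = (k, (List.count k (y :: t) : Int)) := by
        intro k hk
        have hk' : k ∈ t.filter (fun z => !(z == y)) := (PySem.List.mem_dedup _ _).1 hk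
        have hkne : k ≠ y := by simpa using List.of_mem_filter hk'
        simp [List.count_cons_of_ne (Ne.symm hkne)]
      rw [runSpec, if_neg h, ih y 1 hp']
      rw [List.filter_cons_of_pos (by simp [h]), hfilt]
      show _ = (cur, cnt + (List.count cur (y :: t) : Int)) :: (PySem.Set.ofList (y :: t)).map _
      rw [PySem.Set.ofList_cons]
      show _ = (cur, cnt + (List.count cur (y :: t) : Int))
            :: ((y :: (PySem.List.dedup t).filter (fun z => !(z == y))).map _)
      rw [dedup_filter_ne]
      rw [hcnt0]
      simp only [List.map_cons]
      rw [List.map_congr_left hfe]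
      congr 2
      · push_cast; ring
      · simp [List.count_cons_self]
        push_cast; ring

-- the Python tuple key (-count, name) is the lexicographic order on Int ×ₗ String
theorem sorted2_lex (ys : List (String × Int)) :
    PySem.List.sorted2 ys (fun p => -p.2) (fun p => p.1)
      = PySem.List.sorted ys (fun p => toLex ((-p.2 : Int), p.1)) := by
  rw [PySem.List.sorted_eq_foldl_insertBy]
  have hcmp : ∀ (a b : String × Int),
      (decide ((-a.2) < (-b.2)) || (!decide ((-b.2) < (-a.2)) && decide (a.1 < b.1)))
        = decide (toLex ((-a.2 : Int), a.1) < toLex ((-b.2 : Int), b.1)) := by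
    intro a b
    by_cases h1 : (-a.2 : Int) < -b.2
    · simp [h1, Prod.Lex.lt_iff]
    · by_cases h2 : (-b.2 : Int) < -a.2
      · have hne : (-a.2 : Int) ≠ -b.2 := ne_of_gt h2
        simp [h1, h2, hne, Prod.Lex.lt_iff]
      · have he : (-a.2 : Int) = -b.2 := le_antisymm (not_lt.1 h2) (not_lt.1 h1)
        simp [h1, h2, he, Prod.Lex.lt_iff]
  show List.foldl (fun acc x => PySem.List.insertBy
      (fun a b => decide ((-a.2) < (-b.2)) || (!decide ((-b.2) < (-a.2)) && decide (a.1 < b.1)))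
      x acc) [] ys = _
  simp only [hcmp]

theorem keyInj : Function.Injective (fun p : String × Int => toLex ((-p.2 : Int), p.1)) := by
  intro p q h
  have h' : ((-p.2 : Int), p.1) = ((-q.2 : Int), q.1) := h
  obtain ⟨h1, h2⟩ := Prod.mk.injEq .. ▸ h'
  exact Prod.ext h2 (by omega)

-- B's grouped pairs, for a sorted input list, are exactly (key, multiplicity) over first occurrences
theorem pairsB_eq (s : List String) (hs : s.Pairwise (· ≤ ·)) :
    gtPairs s = (PySem.List.dedup s).map (fun k => (k, (List.count k s : Int))) := by
  cases s with
  | nil => rfl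
  | cons x rest =>
    show (let st := rest.foldl gtStep ([], x, 1); st.1 ++ [(st.2.1, st.2.2)]) = _
    rw [foldl_gtStep, List.nil_append, runSpec_eq rest x 1 hs]
    have hfe : ∀ k ∈ PySem.List.dedup (rest.filter (fun z => !(z == x))),
        ((k, (List.count k rest : Int)) : String × Int) = (k, (List.count k (x :: rest) : Int)) := by
      intro k hk
      have hk' : k ∈ rest.filter (fun z => !(z == x)) := (PySem.List.mem_dedup _ _).1 hk
      have hkne : k ≠ x := by simpa using List.of_mem_filter hk'
      simp [List.count_cons_of_ne (Ne.symm hkne)]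
    show _ = (PySem.Set.ofList (x :: rest)).map _
    rw [PySem.Set.ofList_cons]
    show _ = ((x :: (PySem.List.dedup rest).filter (fun z => !(z == x))).map _)
    rw [dedup_filter_ne]
    simp only [List.map_cons]
    rw [List.map_congr_left hfe]
    congr 2
    simp [List.count_cons_self]
    push_cast; ring

theorem group_transactions_spec : Claim_equal_group_transactions := by
  intro xs _
  show group_transactions xs = group_transactions_alt xs
  unfold group_transactions group_transactions_alt
  simp only []
  -- A's counting loop is Counter(xs)
  have hA : xs.foldl (fun d item => d.insert item (1 + d.getD item 0)) PySem.Dict.empty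
      = PySem.Dict.counter xs := by
    have hfun : (fun (d : PySem.Dict String Int) item => d.insert item (1 + d.getD item 0))
        = (fun d x => d.insert x (d.getD x 0 + 1)) := by
      funext d item; rw [Int.add_comm]
    rw [hfun, PySem.Dict.foldl_insert_getD_add_one_eq_counter]
  rw [hA, PySem.Dict.items_counter]
  -- B's grouped pairs over the sorted list
  have hs : (PySem.List.sorted xs (fun x => x)).Pairwise (· ≤ ·) :=
    PySem.List.sorted_pairwise xs (fun x => x)
  rw [pairsB_eq _ hs]
  -- counts over the sorted list equal counts over xs
  have hperm : (PySem.List.sorted xs (fun x => x)).Perm xs := PySem.List.sorted_perm xs _ false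
  have hfcount : (fun k => ((k, (List.count k (PySem.List.sorted xs (fun x => x)) : Int)) : String × Int))
      = (fun k => (k, (List.count k xs : Int))) := by
    funext k; rw [hperm.count_eq]
  rw [hfcount]
  -- both sides sort permutations of the same pair list under an injective key
  congr 1
  rw [sorted2_lex, sorted2_lex]
  apply PySem.List.sorted_eq_sorted_of_perm _ _ _ keyInj
  apply List.Perm.map
  show (PySem.List.dedup xs).Perm (PySem.List.dedup (PySem.List.sorted xs (fun x => x)))
  rw [List.perm_ext_iff_of_nodup (PySem.List.nodup_dedup xs) (PySem.List.nodup_dedup _)]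
  intro a
  rw [PySem.List.mem_dedup, PySem.List.mem_dedup, PySem.List.mem_sorted]
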